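-- pv_equiv track=rewrite | github.com/cobaltt7/python-exercises | 3 puzzles/28-30.py | eTwentyEight
-- ===== SOURCE A (Python) =====
-- def eTwentyEight(data):
--     """
--     Write a Python program to select a string from a given list of strings with the most unique
--     characters.
--     """
--     max = 0
--     found = ""
--
--     for word in data:
--         count = len(set(word))
--         if count > max:
--             max = count
--             found = word
--
--     return found
-- ===== SOURCE B (Python) =====
-- def eTwentyEight(data):
--     """
--     Write a Python program to select a string from a given list of strings with the most unique
--     characters.
--     """
--     if not data:
--         return ""
--     ordered = sorted(data, key=lambda w: len(set(w)), reverse=True)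
--     return ordered[0]
-- ===== Notes on version B (the rewrite author's own statement) =====
-- stated objective: alternative
-- what changed: Replaces the running-maximum scan with a staged sort-then-pick: stably sort the words by descending unique-character count and return the first element (stability preserves A's first-wins tie rule; an explicit guard returns "" on the empty list, and on all-empty-string input the sorted head is "", matching A).
import Mathlib
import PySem

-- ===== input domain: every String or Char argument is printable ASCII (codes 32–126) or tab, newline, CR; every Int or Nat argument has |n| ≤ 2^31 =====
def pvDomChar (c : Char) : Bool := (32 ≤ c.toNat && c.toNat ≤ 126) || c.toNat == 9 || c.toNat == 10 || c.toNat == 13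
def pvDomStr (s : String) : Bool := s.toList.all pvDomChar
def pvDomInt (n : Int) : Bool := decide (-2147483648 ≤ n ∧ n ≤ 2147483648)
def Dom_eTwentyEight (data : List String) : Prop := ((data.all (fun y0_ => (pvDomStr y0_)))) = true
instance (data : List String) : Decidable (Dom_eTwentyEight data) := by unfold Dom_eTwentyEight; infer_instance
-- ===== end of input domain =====

-- B replaces A's running-maximum scan with a stable sort by descending unique-character count, then takes the head.

-- len(set(w)) : number of distinct characters of w (the key both Pythons compute)
def pvUniq (w : String) : Int := ((PySem.Set.ofList w.toList).length : Int)

-- ===== PORT A =====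
def eTwentyEight (data : List String) : String :=
  (data.foldl (fun acc word =>
      let count := pvUniq word
      if acc.1 < count then (count, word) else acc) ((0 : Int), "")).2

-- ===== PORT B =====
def eTwentyEight_alt (data : List String) : String :=
  if data = [] then ""
  else
    let ordered := PySem.List.sorted data pvUniq true
    ordered.headD ""

-- ===== PRECONDITION & SPEC =====
def Spec_eTwentyEight (data : List String) (out : String) : Prop := out = eTwentyEight_alt data
instance (data : List String) (out : String) : Decidable (Spec_eTwentyEight data out) := by unfold Spec_eTwentyEight; infer_instance

-- ===== CLAIM (what is proved, stated in full; the proofs are below) =====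
def Claim_equal_eTwentyEight : Prop := ∀ (data : List String), Dom_eTwentyEight data → Spec_eTwentyEight data (eTwentyEight data)

-- ===== LEMMAS AND PROOFS =====

theorem pvUniq_nonneg (w : String) : 0 ≤ pvUniq w := by simp [pvUniq]

-- a word with no distinct characters is the empty string
theorem pvUniq_eq_zero (w : String) (h : pvUniq w ≤ 0) : w = "" := by
  have hlen : (PySem.Set.ofList w.toList).length = 0 := by
    have := pvUniq_nonneg w; simp only [pvUniq] at h; omega
  have hnil : PySem.Set.ofList w.toList = [] := List.length_eq_zero_iff.mp hlen
  cases hw : w.toList with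
  | nil =>
    have h2 := congrArg String.ofList hw
    rwa [String.ofList_toList] at h2
  | cons c cs =>
    exfalso
    have hc : c ∈ PySem.Set.ofList w.toList := by
      rw [PySem.Set.mem_ofList, hw]; exact List.mem_cons_self
    rw [hnil] at hc
    exact List.not_mem_nil hc

-- inserting into a reverse-ordered list: the new head is the larger-keyed of x and the old head (old head wins ties)
theorem pv_insertBy_rev_head? {α : Type} (key : α → Int) (x : α) (acc : List α) :
    (PySem.List.insertBy (fun a b => decide (key b < key a)) x acc).head?
      = some (match acc with
              | [] => x
              | m :: _ => if key m < key x then x else m) := by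
  cases acc with
  | nil => simp [PySem.List.insertBy]
  | cons m t =>
    by_cases h : key m < key x <;> simp [PySem.List.insertBy, h]

-- the head of the insertion-sort foldl tracks Python's max? (first maximal element)
theorem pv_sortfold_head? {α : Type} (key : α → Int) (l : List α) (acc : List α) :
    (l.foldl (fun a x => PySem.List.insertBy (fun a b => decide (key b < key a)) x a) acc).head?
      = l.foldl (fun o x =>
          match o with
          | none => some x
          | some m => if key m < key x then some x else some m) acc.head? := by
  induction l generalizing acc with
  | nil => rfl
  | cons x t ih =>
    simp only [List.foldl_cons]
    rw [ih, pv_insertBy_rev_head?]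
    cases acc with
    | nil => rfl
    | cons m r =>
      by_cases h : key m < key x <;> simp [h]

-- head of the stable descending sort = Python's max? (first element with maximal key)
theorem pv_sorted_rev_head? {α : Type} (key : α → Int) (xs : List α) :
    (PySem.List.sorted xs key true).head? = PySem.List.max? xs key := by
  rw [PySem.List.sorted_rev_eq_foldl_insertBy, PySem.List.max?]
  exact pv_sortfold_head? key xs []

-- max?'s first step on two explicit elements keeps the earlier one on ties (Python's first-wins rule)
theorem pv_max?_cons_cons {α : Type} (k : α → Int) (x y : α) (t : List α) :
    PySem.List.max? (x :: y :: t) k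
      = PySem.List.max? ((if k x < k y then y else x) :: t) k := by
  by_cases h : k x < k y <;> simp [PySem.List.max?, h]

-- once A's loop carries a current best word w (with its true count), it tracks max? over w :: rest
theorem pv_loop_eq (l : List String) (w : String) :
    (l.foldl (fun acc word =>
        if acc.1 < pvUniq word then (pvUniq word, word) else acc) (pvUniq w, w)).2
      = (PySem.List.max? (w :: l) pvUniq).getD "" := by
  induction l generalizing w with
  | nil => simp [PySem.List.max?]
  | cons x t ih =>
    rw [pv_max?_cons_cons]
    by_cases h : pvUniq w < pvUniq x
    · simpa [List.foldl_cons, h] using ih x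
    · simpa [List.foldl_cons, h] using ih w

-- A's whole loop computes (max? data pvUniq).getD "" on a nonempty list
theorem pv_A_eq_max (x : String) (t : List String) :
    eTwentyEight (x :: t) = (PySem.List.max? (x :: t) pvUniq).getD "" := by
  unfold eTwentyEight
  simp only [List.foldl_cons]
  by_cases h : (0 : Int) < pvUniq x
  · rw [if_pos h]
    exact pv_loop_eq t x
  · rw [if_neg h]
    have hx : x = "" := pvUniq_eq_zero x (le_of_not_gt h)
    subst hx
    have h0 : ((0 : Int), "") = (pvUniq "", "") := by
      have : pvUniq "" = 0 := by decide
      rw [this]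
    rw [h0]
    exact pv_loop_eq t ""

-- ===== VERDICT (by name: the statement is the Claim_ definition above) =====
theorem eTwentyEight_spec : Claim_equal_eTwentyEight := by
  intro data _
  unfold Spec_eTwentyEight
  cases data with
  | nil => rfl
  | cons x t =>
    unfold eTwentyEight_alt
    rw [if_neg (by simp)]
    show eTwentyEight (x :: t) = (PySem.List.sorted (x :: t) pvUniq true).headD ""
    rw [List.headD_eq_head?_getD, pv_sorted_rev_head?]
    exact pv_A_eq_max x t
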